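-- pv_equiv track=rewrite | github.com/spraldev/comp-prog | contests/feb./x.py | find_repeating_sequences
-- ===== SOURCE A (Python) =====
-- def find_repeating_sequences(lst):
--     result = []
--     i = 0
--     n = len(lst)
--
--     while i < n:
--         best = None
--         for k in range(1, (n - i) // 2 + 1):
--             pattern = lst[i:i+k]
--             count = 1
--             while i + (count+1) * k <= n and lst[i + count * k : i + (count+1) * k] == pattern:
--                 count += 1
--             if count > 1:
--                 total_length = count * k
--                 if best is None or total_length > best[2]:
--                     best = (pattern, count, total_length)
--         if best is not None:
--             result.append((tuple(best[0]), best[1]))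
--             i += best[2]
--         else:
--             result.append(((lst[i],), 1))
--             i += 1
--     return result
-- ===== SOURCE B (Python) =====
-- def _lcp(xs, ys):
--     # length of the longest common prefix of xs and ys
--     l = 0
--     for a, b in zip(xs, ys):
--         if a != b:
--             break
--         l += 1
--     return l
--
--
-- def find_repeating_sequences(lst):
--     result = []
--     s = list(lst)
--     while s:
--         m = len(s)
--         best_k = 0
--         best_total = 0
--         for k in range(1, m // 2 + 1):
--             # the maximal run of repeats of s[:k] has length (1 + lcp(s, s[k:]) // k) * k
--             total = (1 + _lcp(s, s[k:]) // k) * k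
--             if total > k and total > best_total:
--                 best_k, best_total = k, total
--         if best_k:
--             result.append((tuple(s[:best_k]), best_total // best_k))
--             s = s[best_total:]
--         else:
--             result.append(((s[0],), 1))
--             s = s[1:]
--     return result
-- ===== Notes on version B (the rewrite author's own statement) =====
-- stated objective: alternative
-- what changed: The inner repeat-counting while loop of block slices compared against the pattern is replaced by a single element-wise longest-common-prefix scan of the suffix against its k-shift, from which the repeat count is obtained arithmetically as 1 + lcp // k.
import Mathlib
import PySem

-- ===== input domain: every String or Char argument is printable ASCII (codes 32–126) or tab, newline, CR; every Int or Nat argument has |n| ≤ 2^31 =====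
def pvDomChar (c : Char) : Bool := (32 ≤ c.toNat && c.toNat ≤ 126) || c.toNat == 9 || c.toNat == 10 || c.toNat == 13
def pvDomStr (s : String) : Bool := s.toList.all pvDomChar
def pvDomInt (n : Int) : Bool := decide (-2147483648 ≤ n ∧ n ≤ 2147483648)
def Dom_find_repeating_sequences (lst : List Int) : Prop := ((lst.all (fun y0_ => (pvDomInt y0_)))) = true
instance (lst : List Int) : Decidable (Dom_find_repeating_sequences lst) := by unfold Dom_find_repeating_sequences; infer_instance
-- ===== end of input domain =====

-- B replaces A's inner repeat-counting loop of block-slice comparisons by one element-wise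
-- longest-common-prefix scan of the suffix against its k-shift (count = 1 + lcp // k):
-- a genuinely different counting algorithm of similar cost ('alternative', no speed claim).

-- ===== PORT A =====
-- inner 'while i + (count+1)*k <= n and lst[...] == pattern: count += 1' (fuel = len(lst) bounds the iterations)
def pvACount (lst : List Int) (n i k : Int) (pattern : List Int) : Int → Nat → Int
  | count, 0 => count
  | count, fuel+1 =>
    if i + (count+1) * k ≤ n ∧
       PySem.List.slice lst (some (i + count * k)) (some (i + (count+1) * k)) = pattern
    then pvACount lst n i k pattern (count+1) fuel
    else count

-- body of 'for k in range(1, (n - i) // 2 + 1)'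
def pvAInner (lst : List Int) (n i : Int) (best : Option (List Int × Int × Int)) (k : Int) :
    Option (List Int × Int × Int) :=
  let pattern := PySem.List.slice lst (some i) (some (i + k))
  let count := pvACount lst n i k pattern 1 lst.length
  if count > 1 then
    let total := count * k
    match best with
    | none => some (pattern, count, total)
    | some b => if total > b.2.2 then some (pattern, count, total) else best
  else best

def pvAStep (lst : List Int) (n i : Int) : Option (List Int × Int × Int) :=
  (PySem.List.pyRange 1 (PySem.Int.floordiv (n - i) 2 + 1) 1).foldl (pvAInner lst n i) none

-- outer 'while i < n' (i grows by ≥ 1 each iteration, so fuel = len(lst)+1 suffices)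
def pvAGo (lst : List Int) (n : Int) : Int → List (List Int × Int) → Nat → List (List Int × Int)
  | _, result, 0 => result
  | i, result, fuel+1 =>
    if i < n then
      match pvAStep lst n i with
      | some (p, c, t) => pvAGo lst n (i + t) (result ++ [(p, c)]) fuel
      | none =>
        -- lst[i] with 0 ≤ i < n: pyGet? is some here, .getD 0 is never taken
        pvAGo lst n (i + 1) (result ++ [([(PySem.List.pyGet? lst i).getD 0], 1)]) fuel
    else result

def find_repeating_sequences (lst : List Int) : List (List Int × Int) :=
  pvAGo lst (lst.length : Int) 0 [] (lst.length + 1)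

-- ===== PORT B =====
-- _lcp(xs, ys): longest common prefix of two lists
def pvLcp : List Int → List Int → Nat
  | a :: xs, b :: ys => if a = b then pvLcp xs ys + 1 else 0
  | _, _ => 0

-- body of 'for k in range(1, m // 2 + 1)' (k = j+1 over j in range(m // 2)); state (best_k, best_total)
def pvBInner (s : List Int) (bst : Nat × Nat) (j : Nat) : Nat × Nat :=
  let k := j + 1
  let total := (1 + pvLcp s (s.drop k) / k) * k
  if total > k ∧ total > bst.2 then (k, total) else bst

def pvBStep (s : List Int) : Nat × Nat :=
  (List.range (s.length / 2)).foldl (pvBInner s) (0, 0)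

-- outer 'while s' (s loses ≥ 1 element each iteration, so fuel = len(lst)+1 suffices)
def pvBGo : List Int → List (List Int × Int) → Nat → List (List Int × Int)
  | _, result, 0 => result
  | s, result, fuel+1 =>
    match s with
    | [] => result
    | x :: _ =>
      let bst := pvBStep s
      if bst.1 ≠ 0 then
        pvBGo (s.drop bst.2) (result ++ [(s.take bst.1, ((bst.2 / bst.1 : Nat) : Int))]) fuel
      else
        pvBGo (s.drop 1) (result ++ [([x], 1)]) fuel

def find_repeating_sequences_alt (lst : List Int) : List (List Int × Int) :=
  pvBGo lst [] (lst.length + 1)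

-- ===== PRECONDITION & SPEC =====
def Spec_find_repeating_sequences (lst : List Int) (out : List (List Int × Int)) : Prop := out = find_repeating_sequences_alt lst
instance (lst : List Int) (out : List (List Int × Int)) : Decidable (Spec_find_repeating_sequences lst out) := by unfold Spec_find_repeating_sequences; infer_instance

-- ===== CLAIM (what is proved, stated in full; the proofs are below) =====
def Claim_equal_find_repeating_sequences : Prop := ∀ (lst : List Int), Dom_find_repeating_sequences lst → Spec_find_repeating_sequences lst (find_repeating_sequences lst)

-- ===== LEMMAS AND PROOFS =====

-- lcp facts
theorem pvLcp_le_right (a b : List Int) : pvLcp a b ≤ b.length := by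
  induction a generalizing b with
  | nil => cases b <;> simp [pvLcp]
  | cons x xs ih =>
    cases b with
    | nil => simp [pvLcp]
    | cons y ys =>
      simp only [pvLcp, List.length_cons]
      split
      · exact Nat.succ_le_succ (ih ys)
      · exact Nat.zero_le _

theorem pvLcp_agree (a b : List Int) (j : Nat) (hj : j < pvLcp a b) : a[j]? = b[j]? := by
  induction a generalizing b j with
  | nil => cases b <;> simp [pvLcp] at hj
  | cons x xs ih =>
    cases b with
    | nil => simp [pvLcp] at hj
    | cons y ys =>
      by_cases h : x = y
      · cases j with
        | zero => simp [h]
        | succ j' =>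
          simp only [pvLcp, if_pos h] at hj
          simpa using ih ys j' (by omega)
      · simp [pvLcp, h] at hj

theorem pvLcp_mismatch (a b : List Int) (ha : pvLcp a b < a.length) (hb : pvLcp a b < b.length) :
    a[pvLcp a b]? ≠ b[pvLcp a b]? := by
  induction a generalizing b with
  | nil => simp at ha
  | cons x xs ih =>
    cases b with
    | nil => simp at hb
    | cons y ys =>
      by_cases h : x = y
      · simp only [pvLcp, if_pos h, List.length_cons] at ha hb ⊢
        simpa using ih ys (by omega) (by omega)
      · simp [pvLcp, h]

-- shift property of L = pvLcp s (s.drop k)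
theorem pvShift (s : List Int) (k j : Nat) (hj : j < pvLcp s (s.drop k)) :
    s[j]? = s[k + j]? := by
  have := pvLcp_agree s (s.drop k) j hj
  simpa [List.getElem?_drop] using this

-- block lemma: while c*k stays within the lcp, block c equals the pattern
theorem pvBlock (s : List Int) (k : Nat) (c : Nat) (hc : c * k ≤ pvLcp s (s.drop k)) :
    (s.drop (c * k)).take k = s.take k := by
  induction c with
  | zero => simp
  | succ c ih =>
    have hkk : (c + 1) * k = c * k + k := by ring
    have hck : c * k ≤ pvLcp s (s.drop k) := by omega
    rw [← ih hck]
    apply List.ext_getElem?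
    intro t
    simp only [List.getElem?_take, List.getElem?_drop]
    by_cases ht : t < k
    · simp only [if_pos ht]
      have hj : c * k + t < pvLcp s (s.drop k) := by omega
      have h2 : (c + 1) * k + t = k + (c * k + t) := by ring
      rw [h2, ← pvShift s k (c * k + t) hj]
    · simp [ht]

-- the A count loop computes 1 + L / k  (s := lst.drop iN, L := pvLcp s (s.drop k))
theorem pvCount_eq (lst : List Int) (iN k : Nat) (hin : iN ≤ lst.length) (hk : 1 ≤ k)
    (hkm : k ≤ (lst.drop iN).length) :
    ∀ fuel c', c' * k ≤ pvLcp (lst.drop iN) ((lst.drop iN).drop k) →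
      1 + pvLcp (lst.drop iN) ((lst.drop iN).drop k) / k ≤ (c' + 1) + fuel →
      pvACount lst (lst.length : Int) (iN : Int) (k : Int) ((lst.drop iN).take k)
        ((c' + 1 : Nat) : Int) fuel
        = ((1 + pvLcp (lst.drop iN) ((lst.drop iN).drop k) / k : Nat) : Int) := by
  set s := lst.drop iN with hs
  set L := pvLcp s (s.drop k) with hL
  have hm : s.length = lst.length - iN := by rw [hs]; simp
  have hLm : L ≤ s.length - k := by
    have := pvLcp_le_right s (s.drop k)
    simpa using this
  intro fuel
  induction fuel with
  | zero =>
    intro c' hc' hfuel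
    have h1 : c' ≤ L / k := (Nat.le_div_iff_mul_le (by omega)).2 hc'
    have h2 : c' = L / k := by omega
    simp only [pvACount]
    omega
  | succ fuel ih =>
    intro c' hc' hfuel
    have hcast1 : ((iN : Int) + ((c' + 1 : Nat) : Int) * (k : Int)) = ((iN + (c' + 1) * k : Nat) : Int) := by
      push_cast; ring
    have hcast2 : ((iN : Int) + (((c' + 1 : Nat) : Int) + 1) * (k : Int)) = ((iN + (c' + 1) * k : Nat) : Int) + (k : Int) := by
      push_cast; ring
    have hslice : PySem.List.slice lst (some ((iN : Int) + ((c' + 1 : Nat) : Int) * (k : Int)))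
        (some ((iN : Int) + (((c' + 1 : Nat) : Int) + 1) * (k : Int)))
        = (s.drop ((c' + 1) * k)).take k := by
      rw [hcast1, hcast2, PySem.List.slice_natCast_add]
      rw [hs, List.drop_drop]
    by_cases hstep : (c' + 1) * k ≤ L
    · -- condition holds: block (c'+1) fits and matches
      have hfit : (iN : Int) + (((c' + 1 : Nat) : Int) + 1) * (k : Int) ≤ (lst.length : Int) := by
        have hx : (c' + 1) * k ≤ s.length - k := le_trans hstep hLm
        have hx2 : iN + (c' + 1) * k + k ≤ lst.length := by omega
        rw [hcast2]
        exact_mod_cast hx2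
      have hcond : ((iN : Int) + (((c' + 1 : Nat) : Int) + 1) * (k : Int) ≤ (lst.length : Int) ∧
          PySem.List.slice lst (some ((iN : Int) + ((c' + 1 : Nat) : Int) * (k : Int)))
            (some ((iN : Int) + (((c' + 1 : Nat) : Int) + 1) * (k : Int))) = s.take k) := by
        refine ⟨hfit, ?_⟩
        rw [hslice]
        exact pvBlock s k (c' + 1) hstep
      simp only [pvACount, if_pos hcond]
      have hcast3 : ((c' + 1 : Nat) : Int) + 1 = ((c' + 1 + 1 : Nat) : Int) := by push_cast; ring
      rw [hcast3]
      exact ih (c' + 1) hstep (by omega)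
    · -- condition fails: c' = L / k and the loop stops
      have hck : (c' + 1) * k = c' * k + k := by ring
      have hdiv : c' = L / k := by
        have h1 : c' ≤ L / k := (Nat.le_div_iff_mul_le (by omega)).2 hc'
        have h2 : L / k < c' + 1 := (Nat.div_lt_iff_lt_mul (by omega)).2 (by omega)
        omega
      have hcond : ¬ ((iN : Int) + (((c' + 1 : Nat) : Int) + 1) * (k : Int) ≤ (lst.length : Int) ∧
          PySem.List.slice lst (some ((iN : Int) + ((c' + 1 : Nat) : Int) * (k : Int)))
            (some ((iN : Int) + (((c' + 1 : Nat) : Int) + 1) * (k : Int))) = s.take k) := by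
        rintro ⟨hfit, heq⟩
        rw [hslice] at heq
        -- fits means (c'+2)*k ≤ s.length
        have hfitN : (c' + 1) * k + k ≤ s.length := by
          rw [hcast2] at hfit
          have : (iN + (c' + 1) * k : Nat) + k ≤ lst.length := by exact_mod_cast hfit
          omega
        -- so L < s.length - k strictly
        have hLlt : L < s.length - k := by omega
        -- mismatch position
        set t := L - c' * k with hts
        have ht : t < k := by omega
        have h3 : s[t]? = s[(c' + 1) * k + t]? := by
          have e1 : (s.take k)[t]? = s[t]? := by simp [ht]
          have e2 : ((s.drop ((c' + 1) * k)).take k)[t]? = s[(c' + 1) * k + t]? := by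
            simp [ht, List.getElem?_drop]
          rw [← e1, ← heq, e2]
        have h4 : s[t]? = s[L]? := by
          have hb := pvBlock s k c' (by omega)
          have e1 : (s.take k)[t]? = s[t]? := by simp [ht]
          have e2 : ((s.drop (c' * k)).take k)[t]? = s[c' * k + t]? := by
            simp [ht, List.getElem?_drop]
          have e3 : c' * k + t = L := by omega
          rw [← e1, ← hb, e2, e3]
        have h5 : (c' + 1) * k + t = k + L := by omega
        have hmis := pvLcp_mismatch s (s.drop k) (by omega) (by simpa using hLlt)
        have hdropL : (s.drop k)[L]? = s[k + L]? := by simp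
        exact hmis (by rw [hdropL, ← h5, ← h3, h4])
      simp only [pvACount, if_neg hcond]
      rw [hdiv]
      push_cast
      ring

-- relation between A's best option and B's (best_k, best_total) pair
def pvRel (s : List Int) (bA : Option (List Int × Int × Int)) (bB : Nat × Nat) : Prop :=
  (bA = none ∧ bB = (0, 0)) ∨
  (∃ k t, 1 ≤ k ∧ t ≤ s.length ∧ bB = (k, t) ∧
    bA = some (s.take k, ((t / k : Nat) : Int), ((t : Nat) : Int)))

theorem pvInner_rel (lst : List Int) (iN j : Nat) (hin : iN ≤ lst.length)
    (hj : j < (lst.drop iN).length / 2) (bA : Option (List Int × Int × Int)) (bB : Nat × Nat)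
    (hrel : pvRel (lst.drop iN) bA bB) :
    pvRel (lst.drop iN) (pvAInner lst (lst.length : Int) (iN : Int) bA (1 + (j : Int)))
      (pvBInner (lst.drop iN) bB j) := by
  simp only [pvAInner, pvBInner]
  have hkc : (1 + (j : Int)) = ((j + 1 : Nat) : Int) := by push_cast; ring
  rw [hkc]
  generalize hgen : j + 1 = k
  set s := lst.drop iN with hs
  have hk1 : 1 ≤ k := by omega
  have hkm : k ≤ s.length := by omega
  set L := pvLcp s (s.drop k) with hL
  have hLm : L ≤ s.length - k := by
    have := pvLcp_le_right s (s.drop k); simpa [← hs] using this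
  -- A's pattern is s.take k
  have hpat : PySem.List.slice lst (some (iN : Int)) (some ((iN : Int) + ((k : Nat) : Int)))
      = s.take k := by
    rw [PySem.List.slice_natCast_add, hs]
  -- A's count is 1 + L/k
  have hcnt : pvACount lst (lst.length : Int) (iN : Int) ((k : Nat) : Int) (s.take k)
      ((0 + 1 : Nat) : Int) lst.length = ((1 + L / k : Nat) : Int) := by
    apply pvCount_eq lst iN k hin (by omega) (by simpa [← hs] using hkm) lst.length 0 (by simp)
    have h1 : L / k ≤ L := Nat.div_le_self _ _
    have h2 : s.length ≤ lst.length := by rw [hs]; simp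
    rw [← hs, ← hL]
    omega
  have hcnt1 : pvACount lst (lst.length : Int) (iN : Int) ((k : Nat) : Int) (s.take k)
      (1 : Int) lst.length = ((1 + L / k : Nat) : Int) := by
    simpa using hcnt
  rw [hpat, hcnt1]
  set tot := (1 + L / k) * k with htot
  have htotk : tot = k + (L / k) * k := by rw [htot]; ring
  have htot_le : tot ≤ s.length := by
    have h1 : (L / k) * k ≤ L := Nat.div_mul_le_self L k
    calc tot = k + (L / k) * k := htotk
      _ ≤ k + L := Nat.add_le_add_left h1 k
      _ ≤ k + (s.length - k) := Nat.add_le_add_left hLm k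
      _ = s.length := Nat.add_sub_cancel' hkm
  have hc1 : L / k = 0 → tot = k := by
    intro h; rw [htot, h]; simp
  have hc2 : 0 < L / k → k + k ≤ tot := by
    intro h
    have h2 : k ≤ (L / k) * k := Nat.le_mul_of_pos_left k h
    rw [htotk]
    exact Nat.add_le_add_left h2 k
  have htot_gt_iff : (tot > k) ↔ (0 < L / k) := by
    constructor
    · intro h
      by_contra h0
      have := hc1 (Nat.eq_zero_of_not_pos h0)
      omega
    · intro h
      have := hc2 h
      omega
  by_cases hgt : tot > k
  · have hD : 0 < L / k := htot_gt_iff.1 hgt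
    have hcA : (((1 + L / k : Nat) : Int) > 1) := by
      push_cast; omega
    have htotc : ((1 + L / k : Nat) : Int) * ((k : Nat) : Int) = ((tot : Nat) : Int) := by
      rw [htot]; push_cast; ring
    have hdivtot : tot / k = 1 + L / k := by
      rw [htot]; exact Nat.mul_div_cancel _ (by omega)
    rcases hrel with ⟨hA, hB⟩ | ⟨k0, t0, hk0, ht0, hB, hA⟩
    · -- previous best: none / (0,0)
      rw [hA, hB]
      have hcB : tot > k ∧ tot > (0, 0).2 := ⟨hgt, by omega⟩
      rw [if_pos hcA, if_pos hcB]
      right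
      refine ⟨k, tot, by omega, htot_le, rfl, ?_⟩
      show some (s.take k, ((1 + L / k : Nat) : Int), ((1 + L / k : Nat) : Int) * ((k : Nat) : Int)) = _
      rw [htotc, hdivtot]
    · rw [hA, hB]
      by_cases hcmp : tot > t0
      · have hcB : tot > k ∧ tot > (k0, t0).2 := ⟨hgt, hcmp⟩
        have hcI : ((1 + L / k : Nat) : Int) * ((k : Nat) : Int) > ((t0 : Nat) : Int) := by
          rw [htotc]; exact_mod_cast hcmp
        rw [if_pos hcA, if_pos hcB]
        show pvRel s (if ((1 + L / k : Nat) : Int) * ((k : Nat) : Int) > ((t0 : Nat) : Int)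
          then some (s.take k, ((1 + L / k : Nat) : Int), ((1 + L / k : Nat) : Int) * ((k : Nat) : Int))
          else some (s.take k0, ((t0 / k0 : Nat) : Int), ((t0 : Nat) : Int))) (k, tot)
        rw [if_pos hcI]
        right
        refine ⟨k, tot, by omega, htot_le, rfl, ?_⟩
        rw [htotc, hdivtot]
      · have hcB : ¬ (tot > k ∧ tot > (k0, t0).2) := by
          rintro ⟨_, h⟩; exact hcmp h
        have hcI : ¬ (((1 + L / k : Nat) : Int) * ((k : Nat) : Int) > ((t0 : Nat) : Int)) := by
          rw [htotc]; intro h; exact hcmp (by exact_mod_cast h)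
        rw [if_pos hcA, if_neg hcB]
        show pvRel s (if ((1 + L / k : Nat) : Int) * ((k : Nat) : Int) > ((t0 : Nat) : Int)
          then some (s.take k, ((1 + L / k : Nat) : Int), ((1 + L / k : Nat) : Int) * ((k : Nat) : Int))
          else some (s.take k0, ((t0 / k0 : Nat) : Int), ((t0 : Nat) : Int))) (k0, t0)
        rw [if_neg hcI]
        right
        exact ⟨k0, t0, hk0, ht0, rfl, rfl⟩
  · have hD : L / k = 0 := by
      by_contra h0
      exact hgt (htot_gt_iff.2 (Nat.pos_of_ne_zero h0))
    have hcA : ¬ (((1 + L / k : Nat) : Int) > 1) := by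
      rw [hD]; norm_num
    have hcB : ¬ (tot > k ∧ tot > bB.2) := by
      rintro ⟨h, _⟩; exact hgt h
    rw [if_neg hcA, if_neg hcB]
    exact hrel

theorem pvFold_rel (lst : List Int) (iN : Nat) (hin : iN ≤ lst.length) :
    ∀ (ks : List Nat), (∀ j ∈ ks, j < (lst.drop iN).length / 2) →
      ∀ bA bB, pvRel (lst.drop iN) bA bB →
      pvRel (lst.drop iN)
        (ks.foldl (fun b (j : Nat) => pvAInner lst (lst.length : Int) (iN : Int) b (1 + (j : Int))) bA)
        (ks.foldl (pvBInner (lst.drop iN)) bB) := by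
  intro ks
  induction ks with
  | nil => intro _ bA bB h; exact h
  | cons j rest ih =>
    intro hmem bA bB h
    simp only [List.foldl_cons]
    exact ih (fun x hx => hmem x (List.mem_cons_of_mem _ hx))
      _ _ (pvInner_rel lst iN j hin (hmem j (List.mem_cons_self)) bA bB h)

theorem pvStep_rel (lst : List Int) (iN : Nat) (hin : iN ≤ lst.length) :
    pvRel (lst.drop iN) (pvAStep lst (lst.length : Int) (iN : Int)) (pvBStep (lst.drop iN)) := by
  unfold pvAStep pvBStep
  have h1 : ((lst.length : Int) - (iN : Int)) = (((lst.drop iN).length : Nat) : Int) := by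
    have hlen : (lst.drop iN).length = lst.length - iN := by simp
    rw [hlen]; omega
  rw [h1]
  rw [show PySem.Int.floordiv (((lst.drop iN).length : Nat) : Int) 2
      = (((lst.drop iN).length / 2 : Nat) : Int) from by
    exact_mod_cast PySem.Int.floordiv_natCast (lst.drop iN).length 2]
  rw [PySem.List.pyRange_one]
  rw [show ((((lst.drop iN).length / 2 : Nat) : Int) + 1 - 1).toNat = (lst.drop iN).length / 2 from by
    omega]
  rw [List.foldl_map]
  exact pvFold_rel lst iN hin (List.range ((lst.drop iN).length / 2))
    (fun j hj => List.mem_range.mp hj) none (0, 0) (Or.inl ⟨rfl, rfl⟩)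

theorem pvGo_eq (lst : List Int) :
    ∀ fuel iN res, iN ≤ lst.length →
      pvAGo lst (lst.length : Int) (iN : Int) res fuel = pvBGo (lst.drop iN) res fuel := by
  intro fuel
  induction fuel with
  | zero => intro iN res _; simp [pvAGo, pvBGo]
  | succ fuel ih =>
    intro iN res hin
    by_cases hlt : iN < lst.length
    · have hiA : ((iN : Int) < (lst.length : Int)) := by exact_mod_cast hlt
      obtain ⟨x, tl, hxs⟩ : ∃ x tl, lst.drop iN = x :: tl := by
        cases hcs : lst.drop iN with
        | nil =>
          exfalso
          have hl : (lst.drop iN).length = lst.length - iN := by simp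
          rw [hcs] at hl
          simp at hl
          omega
        | cons a b => exact ⟨a, b, rfl⟩
      have hlen : (lst.drop iN).length = lst.length - iN := by simp
      rcases pvStep_rel lst iN hin with ⟨hA, hB⟩ | ⟨k, t, hk, ht, hB, hA⟩
      · -- no repeat found: advance by 1
        have hget : (PySem.List.pyGet? lst (iN : Int)).getD 0 = x := by
          rw [PySem.List.pyGet?_natCast]
          have h0 : (lst.drop iN)[0]? = some x := by rw [hxs]; rfl
          have h0' : lst[iN]? = some x := by simpa using h0
          rw [h0']; rfl
        rw [hxs] at hB
        simp only [pvAGo, if_pos hiA, hA, hget]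
        rw [hxs]
        simp only [pvBGo, hB]
        rw [if_neg (by simp)]
        have hcast : ((iN : Int) + 1) = ((iN + 1 : Nat) : Int) := by push_cast; ring
        rw [hcast, ih (iN + 1) _ (by omega)]
        have hdr : tl = lst.drop (iN + 1) := by
          have h2 : (lst.drop iN).drop 1 = lst.drop (iN + 1) := List.drop_drop
          rw [hxs] at h2
          simpa using h2
        have h3 : (x :: tl).drop 1 = tl := by simp
        rw [h3, hdr]
      · -- repeat found: advance by t
        rw [hxs] at hB
        simp only [pvAGo, if_pos hiA, hA]
        rw [hxs]
        simp only [pvBGo, hB]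
        have hkne : ((k, t) : Nat × Nat).1 ≠ 0 := by show k ≠ 0; omega
        rw [if_pos hkne]
        have hcast : ((iN : Int) + ((t : Nat) : Int)) = ((iN + t : Nat) : Int) := by push_cast; ring
        have hin' : iN + t ≤ lst.length := by
          rw [hlen] at ht
          omega
        rw [hcast, ih (iN + t) _ hin']
        have hdr : (x :: tl).drop t = lst.drop (iN + t) := by
          rw [← hxs, List.drop_drop]
        rw [hdr]
    · have hiA : ¬ ((iN : Int) < (lst.length : Int)) := by
        intro h; exact hlt (by exact_mod_cast h)
      have hnil : lst.drop iN = [] := List.drop_eq_nil_of_le (by omega)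
      simp only [pvAGo, if_neg hiA, hnil, pvBGo]

-- ===== VERDICT (by name: the statement is the Claim_ definition above) =====
theorem find_repeating_sequences_spec : Claim_equal_find_repeating_sequences := by
  intro lst _
  unfold Spec_find_repeating_sequences find_repeating_sequences find_repeating_sequences_alt
  simpa using pvGo_eq lst (lst.length + 1) 0 [] (by omega)
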